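-- pv_equiv track=rewrite | github.com/danielnyga/prac-dev | pracweb/gui/pages/inference.py | format_cram_string
-- ===== SOURCE A (Python) =====
-- def format_cram_string(cramstring):
--     l = {}
--     newstring = ''
--     lines = cramstring.split('\n')
--
--     for line in lines:
--         ts = line.split('\t!')
--         nline = ''.join(ts)
--         tabcnt = nline.count('\t')
--
--         if len(ts) > 1:
--             for t, tn in enumerate(ts):
--                 l[t + tabcnt] = len(
--                     ''.join([x.strip('\t') for x in ts[:t]])) + l.get(tabcnt,
--                                                                       0)
--         newstring += ' ' * l.get(tabcnt, 0) + nline.strip() + '\n'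
--     return newstring
-- ===== SOURCE B (Python) =====
-- def format_cram_string(cramstring):
--     l = {}
--     out = []
--     for line in cramstring.split('\n'):
--         ts = line.split('\t!')
--         nline = ''.join(ts)
--         tabcnt = nline.count('\t')
--         if len(ts) > 1:
--             offs = []
--             total = 0
--             for seg in ts:
--                 offs.append(total)
--                 total += len(seg.strip('\t'))
--             base = l.get(tabcnt, 0)
--             for t, o in enumerate(offs):
--                 l[t + tabcnt] = base + o
--         out.append(' ' * l.get(tabcnt, 0) + nline.strip())
--     return ''.join(x + '\n' for x in out)
-- ===== Notes on version B (the rewrite author's own statement) =====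
-- stated objective: alternative
-- what changed: B first computes the per-segment offset list as a single prefix-sum pass (instead of A's re-joining and re-measuring the stripped prefix ts[:t] at every index), writes the dict from that precomputed list against a hoisted base, and collects output lines in a list joined once at the end instead of repeated string concatenation.
import Mathlib
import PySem

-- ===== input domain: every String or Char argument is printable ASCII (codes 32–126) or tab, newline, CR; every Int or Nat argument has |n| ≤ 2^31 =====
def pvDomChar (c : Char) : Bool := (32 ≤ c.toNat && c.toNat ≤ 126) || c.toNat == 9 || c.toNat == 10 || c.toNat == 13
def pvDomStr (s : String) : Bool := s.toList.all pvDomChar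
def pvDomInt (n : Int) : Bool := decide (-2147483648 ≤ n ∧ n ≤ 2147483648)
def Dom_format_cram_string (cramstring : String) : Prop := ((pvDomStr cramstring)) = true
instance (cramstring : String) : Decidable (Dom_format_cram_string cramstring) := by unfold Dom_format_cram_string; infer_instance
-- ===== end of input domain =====

-- B precomputes per-segment offsets as one prefix-sum list (instead of A's per-index
-- re-join of the stripped prefix) and collects output lines in a list flattened once.


-- ===== PORT A =====
-- one iteration of A's 'for line in lines' loop; state = (l, newstring)
def cramStepA (st : PySem.Dict Int Int × List Char) (line : List Char) :
    PySem.Dict Int Int × List Char :=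
  let ts := PySem.Chars.splitOn line ['\t', '!']
  let nline := PySem.Chars.join [] ts
  let tabcnt : Int := (PySem.Chars.count nline ['\t'] : Int)
  let l :=
    if ts.length > 1 then
      (PySem.List.enumerate ts 0).foldl
        (fun l p =>
          l.insert (p.1 + tabcnt)
            (((PySem.Chars.join [] ((PySem.List.slice ts none (some p.1)).map
                (fun x => PySem.Chars.stripChars x ['\t']))).length : Int)
              + l.getD tabcnt 0))
        st.1
    else st.1
  (l, st.2 ++ PySem.List.pyRepeat [' '] (l.getD tabcnt 0) ++ PySem.Chars.strip nline ++ ['\n'])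

def format_cram_string (cramstring : String) : String :=
  let lines := PySem.Chars.splitOn cramstring.toList ['\n']
  String.ofList ((lines.foldl cramStepA (PySem.Dict.empty, [])).2)

-- ===== PORT B =====
-- B's inner prefix-sum pass: 'offs.append(total); total += len(seg.strip("\t"))'
def cramOffs (ts : List (List Char)) : List Int :=
  (ts.foldl
    (fun (p : List Int × Int) seg =>
      (p.1 ++ [p.2], p.2 + ((PySem.Chars.stripChars seg ['\t']).length : Int)))
    ([], 0)).1

-- B's per-line body: returns the updated dict and this line's output text (no '\n')
def cramLineB (l : PySem.Dict Int Int) (line : List Char) :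
    PySem.Dict Int Int × List Char :=
  let ts := PySem.Chars.splitOn line ['\t', '!']
  let nline := PySem.Chars.join [] ts
  let tabcnt : Int := (PySem.Chars.count nline ['\t'] : Int)
  let l' :=
    if ts.length > 1 then
      let base := l.getD tabcnt 0
      (PySem.List.enumerate (cramOffs ts) 0).foldl
        (fun d p => d.insert (p.1 + tabcnt) (base + p.2)) l
    else l
  (l', PySem.List.pyRepeat [' '] (l'.getD tabcnt 0) ++ PySem.Chars.strip nline)

-- B's outer loop: state = (l, out); out is the list of finished lines
def cramStepB (s : PySem.Dict Int Int × List (List Char)) (line : List Char) :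
    PySem.Dict Int Int × List (List Char) :=
  let p := cramLineB s.1 line
  (p.1, s.2 ++ [p.2])

def format_cram_string_alt (cramstring : String) : String :=
  let st := (PySem.Chars.splitOn cramstring.toList ['\n']).foldl
      cramStepB (PySem.Dict.empty, [])
  String.ofList ((st.2.map (fun x => x ++ ['\n'])).flatten)

-- ===== PRECONDITION & SPEC =====
def Spec_format_cram_string (cramstring : String) (out : String) : Prop := out = format_cram_string_alt cramstring
instance (cramstring : String) (out : String) : Decidable (Spec_format_cram_string cramstring out) := by unfold Spec_format_cram_string; infer_instance

-- ===== CLAIM (what is proved, stated in full; the proofs are below) =====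
def Claim_equal_format_cram_string : Prop := ∀ (cramstring : String), Dom_format_cram_string cramstring → Spec_format_cram_string cramstring (format_cram_string cramstring)

-- ===== LEMMAS AND PROOFS =====

-- length of a sep-less join is the sum of the lengths
lemma join_nil_length (ps : List (List Char)) :
    (PySem.Chars.join [] ps).length = (ps.map List.length).sum := by
  induction ps with
  | nil => simp [PySem.Chars.join, List.intercalate]
  | cons h t ih =>
      cases t with
      | nil => simp [PySem.Chars.join, List.intercalate]
      | cons h' t' => simpa [PySem.Chars.join_cons_cons] using ih

-- offs-list fold: pulling the accumulated list out front
lemma offs_accum (ts : List (List Char)) :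
    ∀ (l0 : List Int) (a : Int),
      (ts.foldl
        (fun (p : List Int × Int) seg =>
          (p.1 ++ [p.2], p.2 + ((PySem.Chars.stripChars seg ['\t']).length : Int)))
        (l0, a)).1
      = l0 ++ (ts.foldl
        (fun (p : List Int × Int) seg =>
          (p.1 ++ [p.2], p.2 + ((PySem.Chars.stripChars seg ['\t']).length : Int)))
        ([], a)).1 := by
  induction ts with
  | nil => intro l0 a; simp
  | cons x t ih =>
      intro l0 a
      simp only [List.foldl_cons]
      rw [ih (l0 ++ [a]), ih ([] ++ [a])]
      simp

-- the generalized offs list, starting the running total at a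
def cramOffsFrom (a : Int) (ts : List (List Char)) : List Int :=
  (ts.foldl
    (fun (p : List Int × Int) seg =>
      (p.1 ++ [p.2], p.2 + ((PySem.Chars.stripChars seg ['\t']).length : Int)))
    ([], a)).1

lemma cramOffsFrom_cons (a : Int) (x : List Char) (t : List (List Char)) :
    cramOffsFrom a (x :: t)
      = a :: cramOffsFrom (a + ((PySem.Chars.stripChars x ['\t']).length : Int)) t := by
  unfold cramOffsFrom
  simp only [List.foldl_cons]
  rw [offs_accum]
  simp

-- B's dict write from the precomputed offs list equals the pair-state running fold
lemma offs_fold_eq (tabcnt base : Int) :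
    ∀ (ts : List (List Char)) (s : Int) (d : PySem.Dict Int Int) (acc : Int),
      (PySem.List.enumerate (cramOffsFrom acc ts) s).foldl
        (fun d p => d.insert (p.1 + tabcnt) (base + p.2)) d
      = ((PySem.List.enumerate ts s).foldl
          (fun (st : PySem.Dict Int Int × Int) p =>
            (st.1.insert (p.1 + tabcnt) (base + st.2),
             st.2 + ((PySem.Chars.stripChars p.2 ['\t']).length : Int)))
          (d, acc)).1 := by
  intro ts
  induction ts with
  | nil =>
      intro s d acc
      simp [cramOffsFrom, PySem.List.enumerate_nil]
  | cons x t ih =>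
      intro s d acc
      rw [cramOffsFrom_cons, PySem.List.enumerate_cons, PySem.List.enumerate_cons]
      simp only [List.foldl_cons]
      exact ih (s + 1) _ _

-- A's inner per-index rebuild equals the pair-state running fold
lemma inner_eq (tabcnt : Int) (ts : List (List Char)) :
    ∀ (rest : List (List Char)) (s : Nat) (d : PySem.Dict Int Int) (acc base : Int),
      ts.drop s = rest →
      d.getD tabcnt 0 = base →
      acc = ((((ts.take s).map (fun x => PySem.Chars.stripChars x ['\t'])).map List.length).sum : Int) →
      (PySem.List.enumerate rest (s : Int)).foldl
        (fun l p =>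
          l.insert (p.1 + tabcnt)
            (((PySem.Chars.join [] ((PySem.List.slice ts none (some p.1)).map
                (fun x => PySem.Chars.stripChars x ['\t']))).length : Int)
              + l.getD tabcnt 0)) d
      = ((PySem.List.enumerate rest (s : Int)).foldl
          (fun (st : PySem.Dict Int Int × Int) p =>
            (st.1.insert (p.1 + tabcnt) (base + st.2),
             st.2 + ((PySem.Chars.stripChars p.2 ['\t']).length : Int)))
          (d, acc)).1 := by
  intro rest
  induction rest with
  | nil => intro s d acc base _ _ _; simp [PySem.List.enumerate_nil]
  | cons x rest' ih =>
      intro s d acc base hdrop hbase hacc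
      have hx : ts[s]? = some x := by
        have := List.getElem?_drop (xs := ts) (i := s) (j := 0)
        simp [hdrop] at this; simpa using this.symm
      have htake : ts.take (s+1) = ts.take s ++ [x] := by
        simp [List.take_add_one, hx]
      have hdrop' : ts.drop (s+1) = rest' := by
        rw [← List.drop_drop, hdrop]; rfl
      have hval :
          ((PySem.Chars.join [] ((PySem.List.slice ts none (some (s : Int))).map
              (fun x => PySem.Chars.stripChars x ['\t']))).length : Int) + d.getD tabcnt 0
          = base + acc := by
        rw [PySem.List.slice_to_natCast, join_nil_length, hbase, hacc]; ring
      set d1 := d.insert ((s : Int) + tabcnt) (base + acc) with hd1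
      have hbase1 : d1.getD tabcnt 0 = base := by
        rw [hd1, PySem.Dict.getD_insert]
        split_ifs with h
        · have hs0 : s = 0 := by omega
          subst hs0
          simp at hacc
          omega
        · exact hbase
      have hacc1 : acc + ((PySem.Chars.stripChars x ['\t']).length : Int)
          = ((((ts.take (s+1)).map (fun x => PySem.Chars.stripChars x ['\t'])).map List.length).sum : Int) := by
        rw [htake, hacc]; push_cast; simp
      rw [PySem.List.enumerate_cons]
      simp only [List.foldl_cons, hval]
      have hcast : (s : Int) + 1 = ((s + 1 : Nat) : Int) := by push_cast; ring
      rw [hcast]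
      exact ih (s+1) d1 (acc + ((PySem.Chars.stripChars x ['\t']).length : Int)) base hdrop' hbase1 hacc1

-- one line-step of A produces B's per-line dict and text, with '\n' appended
lemma stepA_eq (st : PySem.Dict Int Int × List Char) (line : List Char) :
    cramStepA st line
      = ((cramLineB st.1 line).1, st.2 ++ (cramLineB st.1 line).2 ++ ['\n']) := by
  unfold cramStepA cramLineB
  have h1 := inner_eq ((PySem.Chars.count (PySem.Chars.join [] (PySem.Chars.splitOn line ['\t', '!'])) ['\t'] : Int))
      (PySem.Chars.splitOn line ['\t', '!'])
      (PySem.Chars.splitOn line ['\t', '!']) 0 st.1 0 (st.1.getD _ 0) rfl rfl (by simp)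
  have h2 := offs_fold_eq ((PySem.Chars.count (PySem.Chars.join [] (PySem.Chars.splitOn line ['\t', '!'])) ['\t'] : Int))
      (st.1.getD ((PySem.Chars.count (PySem.Chars.join [] (PySem.Chars.splitOn line ['\t', '!'])) ['\t'] : Int)) 0)
      (PySem.Chars.splitOn line ['\t', '!']) 0 st.1 0
  simp only [Nat.cast_zero] at h1 h2
  have hoffs : cramOffs (PySem.Chars.splitOn line ['\t', '!'])
      = cramOffsFrom 0 (PySem.Chars.splitOn line ['\t', '!']) := rfl
  simp only [h1, hoffs, h2, List.append_assoc]

-- pulling B's accumulated output list out front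
lemma stepB_accum (ls : List (List Char)) :
    ∀ (d : PySem.Dict Int Int) (outs : List (List Char)),
      ls.foldl cramStepB (d, outs)
        = ((ls.foldl cramStepB (d, [])).1, outs ++ (ls.foldl cramStepB (d, [])).2) := by
  induction ls with
  | nil => intro d outs; simp
  | cons x t ih =>
      intro d outs
      simp only [List.foldl_cons, cramStepB]
      rw [ih ((cramLineB d x).1) (outs ++ [(cramLineB d x).2]),
          ih ((cramLineB d x).1) ([] ++ [(cramLineB d x).2])]
      simp

-- A's accumulated string is B's line list, each line terminated by '\n'
lemma fold_eq (ls : List (List Char)) :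
    ∀ (d : PySem.Dict Int Int) (cs : List Char),
      (ls.foldl cramStepA (d, cs)).2
        = cs ++ (((ls.foldl cramStepB (d, [])).2).map (fun x => x ++ ['\n'])).flatten := by
  induction ls with
  | nil => intro d cs; simp
  | cons x t ih =>
      intro d cs
      simp only [List.foldl_cons, stepA_eq, cramStepB]
      rw [ih, stepB_accum t ((cramLineB d x).1) ([] ++ [(cramLineB d x).2])]
      simp

-- ===== VERDICT (by name: the statement is the Claim_ definition above) =====
theorem format_cram_string_spec : Claim_equal_format_cram_string := by
  intro s _
  unfold Spec_format_cram_string format_cram_string format_cram_string_alt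
  simp only [fold_eq]
  simp
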